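-- pv_equiv track=rewrite | github.com/CodeLab4/lab4_algorithm_python | programmers/lv2/138476_Hana.py | solution
-- ===== SOURCE A (Python) =====
-- from collections import Counter
--
-- def solution(k, tangerine):
--     answer = 0
--
--     counter = Counter(tangerine)
--     sorted_lst = sorted(counter.values(), reverse=True)
--
--     i = 0
--     t = 0  # 포장한 귤의 개수
--
--     while t < k:
--         t += sorted_lst[i]
--         answer += 1
--         i += 1
--
--     return answer
-- ===== SOURCE B (Python) =====
-- from collections import Counter
-- from bisect import bisect_left
-- from itertools import accumulate
--
--
-- def solution(k, tangerine):
--     if k <= 0: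
--         return 0
--     prefix = list(accumulate(sorted(Counter(tangerine).values(), reverse=True)))
--     return bisect_left(prefix, k) + 1
-- ===== Notes on version B (the rewrite author's own statement) =====
-- stated objective: alternative
-- what changed: Replaces A's index-stepping while-loop that greedily accumulates the descending counts until reaching k by prefix sums (itertools.accumulate) plus a binary search (bisect_left) for the first prefix sum >= k.
import Mathlib
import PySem

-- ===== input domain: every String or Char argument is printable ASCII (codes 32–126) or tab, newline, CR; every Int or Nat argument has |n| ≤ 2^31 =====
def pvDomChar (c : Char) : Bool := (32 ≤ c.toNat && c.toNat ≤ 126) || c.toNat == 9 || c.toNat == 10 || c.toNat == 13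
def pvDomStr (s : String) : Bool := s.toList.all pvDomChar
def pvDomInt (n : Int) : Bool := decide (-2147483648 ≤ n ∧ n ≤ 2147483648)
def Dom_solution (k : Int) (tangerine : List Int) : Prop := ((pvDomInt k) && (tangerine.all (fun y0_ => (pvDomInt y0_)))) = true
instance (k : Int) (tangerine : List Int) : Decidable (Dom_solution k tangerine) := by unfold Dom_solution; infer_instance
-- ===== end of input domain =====

-- B replaces A's linear greedy while-loop over the descending counts by prefix sums + binary search (bisect_left); objective: alternative decomposition, same cost.


-- ===== PORT A =====
-- the 'while t < k' loop, with fuel (inside Pre_ the loop makes at most sorted_lst.length iterations);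
-- the 'none' branch of pyGet? is Python's IndexError (outside Pre_).
def solutionLoop (sorted_lst : List Int) (k : Int) : Nat → Int → Int → Int → Int
  | 0, _t, answer, _i => answer
  | fuel + 1, t, answer, i =>
    if t < k then
      match PySem.List.pyGet? sorted_lst i with
      | none => answer
      | some v => solutionLoop sorted_lst k fuel (t + v) (answer + 1) (i + 1)
    else answer

def solution (k : Int) (tangerine : List Int) : Int :=
  let counter := PySem.Dict.counter tangerine
  let sorted_lst := PySem.List.sorted counter.values (fun x => x) true
  solutionLoop sorted_lst k (sorted_lst.length + 1) 0 0 0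

-- ===== PORT B =====
-- itertools.accumulate (running prefix sums)
def accumFrom (s : Int) : List Int → List Int
  | [] => []
  | x :: xs => (s + x) :: accumFrom (s + x) xs

def solution_alt (k : Int) (tangerine : List Int) : Int :=
  if k ≤ 0 then 0
  else
    let pref := accumFrom 0 (PySem.List.sorted (PySem.Dict.counter tangerine).values (fun x => x) true)
    ((PySem.List.bisectLeft pref k : Nat) : Int) + 1

-- ===== PRECONDITION & SPEC =====
-- Pre_ excludes exactly the inputs where A raises IndexError: k greater than the number of
-- tangerines (the greedy exhausts all counts with t = len(tangerine) < k and reads past the list).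
def Pre_solution (k : Int) (tangerine : List Int) : Prop := k ≤ (tangerine.length : Int)
instance (k : Int) (tangerine : List Int) : Decidable (Pre_solution k tangerine) := by unfold Pre_solution; infer_instance
def pvWitness_solution : Int × List Int := (2, [1, 1, 2])

def Spec_solution (k : Int) (tangerine : List Int) (out : Int) : Prop := out = solution_alt k tangerine
instance (k : Int) (tangerine : List Int) (out : Int) : Decidable (Spec_solution k tangerine out) := by unfold Spec_solution; infer_instance

-- ===== CLAIM (what is proved, stated in full; the proofs are below) =====
def Claim_equal_solution : Prop := ∀ (k : Int) (tangerine : List Int), Dom_solution k tangerine → Pre_solution k tangerine → Spec_solution k tangerine (solution k tangerine)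

-- ===== LEMMAS AND PROOFS =====

-- abstract step counter of A's loop: how many counts the greedy consumes
def steps : List Int → Int → Nat
  | [], _ => 0
  | x :: xs, r => if 0 < r then steps xs (r - x) + 1 else 0

theorem steps_of_nonpos (l : List Int) (r : Int) (h : r ≤ 0) : steps l r = 0 := by
  cases l with
  | nil => rfl
  | cons x xs =>
    have h0 : ¬ (0 < r) := by omega
    simp [steps, h0]

theorem solutionLoop_eq_steps (lst : List Int) (k : Int) :
    ∀ (fuel : Nat) (i : Nat) (t answer : Int), lst.length - i < fuel →
      solutionLoop lst k fuel t answer (i : Int) = answer + (steps (lst.drop i) (k - t) : Int) := by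
  intro fuel
  induction fuel with
  | zero => intro i t answer h; omega
  | succ n ih =>
    intro i t answer h
    by_cases hik : i < lst.length
    · have hdrop : lst.drop i = lst[i] :: lst.drop (i + 1) := List.drop_eq_getElem_cons hik
      have hget : PySem.List.pyGet? lst (i : Int) = some lst[i] := by
        simp [PySem.List.pyGet?, PySem.List.pyIdx?, hik]
      by_cases ht : t < k
      · have hstep : solutionLoop lst k (n + 1) t answer (i : Int)
            = solutionLoop lst k n (t + lst[i]) (answer + 1) ((i : Int) + 1) := by
          simp [solutionLoop, ht, hget]
        have hcast : ((i : Int) + 1) = ((i + 1 : Nat) : Int) := by push_cast; ring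
        rw [hstep, hcast, ih (i + 1) (t + lst[i]) (answer + 1) (by omega), hdrop]
        have hr : (0:Int) < k - t := by omega
        have hs : steps (lst[i] :: lst.drop (i + 1)) (k - t)
            = steps (lst.drop (i + 1)) (k - t - lst[i]) + 1 := by
          simp only [steps]
          rw [if_pos hr]
        rw [hs]
        have harg : k - (t + lst[i]) = k - t - lst[i] := by ring
        rw [harg]; push_cast; ring
      · have h1 : solutionLoop lst k (n + 1) t answer (i : Int) = answer := by
          simp [solutionLoop, ht]
        have hr : ¬ ((0:Int) < k - t) := by omega
        have hs : steps (lst.drop i) (k - t) = 0 := by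
          rw [hdrop]
          simp only [steps]
          rw [if_neg hr]
        rw [h1, hs]
        simp
    · have hdrop : lst.drop i = [] := List.drop_eq_nil_of_le (by omega)
      have hget : PySem.List.pyGet? lst (i : Int) = none := by
        simp [PySem.List.pyGet?, PySem.List.pyIdx?]
        omega
      by_cases ht : t < k
      · simp [solutionLoop, ht, hget, hdrop, steps]
      · simp [solutionLoop, ht, hdrop, steps]

theorem length_accumFrom (s : Int) (l : List Int) : (accumFrom s l).length = l.length := by
  induction l generalizing s with
  | nil => rfl
  | cons x xs ih => simp [accumFrom, ih]

theorem accumFrom_getElem (s : Int) (l : List Int) (j : Nat) (hj : j < l.length) :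
    (accumFrom s l)[j]'(by rw [length_accumFrom]; exact hj) = s + (l.take (j + 1)).sum := by
  induction l generalizing s j with
  | nil => simp at hj
  | cons x xs ih =>
    cases j with
    | zero => simp [accumFrom]
    | succ j' =>
      have := ih (s + x) j' (by simpa using hj)
      simp only [accumFrom, List.getElem_cons_succ, List.take_succ_cons, List.sum_cons]
      rw [this]; ring

theorem accumFrom_pairwise_le (s : Int) (l : List Int) (hpos : ∀ x ∈ l, 1 ≤ x) :
    (accumFrom s l).Pairwise (· ≤ ·) := by
  induction l generalizing s with
  | nil => simp [accumFrom]
  | cons x xs ih =>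
    simp only [accumFrom, List.pairwise_cons]
    constructor
    · intro a ha
      -- every later prefix sum adds only positive elements
      have : ∀ (t : List Int) (s' : Int), (∀ y ∈ t, 1 ≤ y) → ∀ a ∈ accumFrom s' t, s' ≤ a := by
        intro t
        induction t with
        | nil => intro s' _ a ha; simp [accumFrom] at ha
        | cons y ys ihy =>
          intro s' hy a ha
          simp only [accumFrom, List.mem_cons] at ha
          rcases ha with rfl | ha
          · have := hy y (by simp); omega
          · have h1 := ihy (s' + y) (fun z hz => hy z (by simp [hz])) a ha
            have := hy y (by simp); omega
      exact this xs (s + x) (fun y hy => hpos y (by simp [hy])) a ha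
    · exact ih (s + x) (fun y hy => hpos y (by simp [hy]))

theorem steps_spec (l : List Int) (r : Int) (hpos : ∀ x ∈ l, 1 ≤ x) (hr : 0 < r)
    (hle : r ≤ l.sum) :
    1 ≤ steps l r ∧ steps l r ≤ l.length ∧ r ≤ (l.take (steps l r)).sum ∧
      ∀ j : Nat, j < steps l r - 1 → (l.take (j + 1)).sum < r := by
  induction l generalizing r with
  | nil => simp at hle; omega
  | cons x xs ih =>
    have hx : 1 ≤ x := hpos x (by simp)
    have hstep : steps (x :: xs) r = steps xs (r - x) + 1 := by simp [steps, hr]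
    by_cases hrx : r ≤ x
    · have h0 : steps xs (r - x) = 0 := steps_of_nonpos xs (r - x) (by omega)
      rw [hstep, h0]
      refine ⟨by omega, by simp, by simpa using hrx, ?_⟩
      intro j hj; omega
    · have hr' : 0 < r - x := by omega
      have hle' : r - x ≤ xs.sum := by simp at hle; omega
      obtain ⟨h1, h2, h3, h4⟩ := ih (r - x) (fun y hy => hpos y (by simp [hy])) hr' hle'
      rw [hstep]
      refine ⟨by omega, by simp; omega, ?_, ?_⟩
      · simp only [List.take_succ_cons, List.sum_cons]; omega
      · intro j hj
        cases j with
        | zero => simpa using (by omega : x < r)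
        | succ j' =>
          have := h4 j' (by omega)
          simp only [List.take_succ_cons, List.sum_cons]; omega

-- the two characterisations pin the same index: bisectLeft of the prefix sums + 1 = steps
theorem bisect_eq_steps (l : List Int) (r : Int) (hpos : ∀ x ∈ l, 1 ≤ x) (hr : 0 < r)
    (hle : r ≤ l.sum) :
    ((PySem.List.bisectLeft (accumFrom 0 l) r : Nat) : Int) + 1 = (steps l r : Int) := by
  obtain ⟨h1, h2, h3, h4⟩ := steps_spec l r hpos hr hle
  set m := steps l r with hm
  have hsorted := accumFrom_pairwise_le 0 l hpos
  obtain ⟨hb1, hb2, hb3⟩ := PySem.List.bisectLeft_spec (accumFrom 0 l) r hsorted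
  set b := PySem.List.bisectLeft (accumFrom 0 l) r with hb
  have hlen : (accumFrom 0 l).length = l.length := length_accumFrom 0 l
  have hm1lt : m - 1 < l.length := by omega
  have hprem : r ≤ (accumFrom 0 l)[m - 1]'(by omega) := by
    rw [accumFrom_getElem 0 l (m - 1) hm1lt]
    have : m - 1 + 1 = m := by omega
    rw [this]; omega
  have hbm : b = m - 1 := by
    by_contra hne
    rcases Nat.lt_or_ge b (m - 1) with hlt | hge
    · have := hb3 b (by omega) (le_refl b)
      have hb' := h4 b (by omega)
      rw [accumFrom_getElem 0 l b (by omega)] at this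
      simp at this; omega
    · have hm1b : m - 1 < b := by omega
      have := hb2 (m - 1) (by omega) hm1b
      omega
  rw [hbm]; omega

-- counter values: positive, and they sum to the length of the input
theorem counter_values_eq (tangerine : List Int) :
    (PySem.Dict.counter tangerine).values
      = (PySem.Set.ofList tangerine).map (fun v => (tangerine.count v : Int)) := by
  rw [PySem.Dict.values_eq_map_keys _ (PySem.Dict.nodup_keys_counter tangerine) 0]
  rw [PySem.Dict.keys_counter]
  exact List.map_congr_left (fun v _ => PySem.Dict.getD_counter tangerine v)

theorem counter_values_pos (tangerine : List Int) :
    ∀ x ∈ (PySem.Dict.counter tangerine).values, 1 ≤ x := by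
  rw [counter_values_eq]
  intro x hx
  simp only [List.mem_map] at hx
  obtain ⟨v, hv, rfl⟩ := hx
  have hvm : v ∈ tangerine := by
    have := hv; simp [PySem.Set.mem_ofList] at this; exact this
  have := List.count_pos_iff.mpr hvm
  exact_mod_cast this

theorem counter_values_sum (tangerine : List Int) :
    (PySem.Dict.counter tangerine).values.sum = (tangerine.length : Int) := by
  rw [counter_values_eq]
  have hperm : (PySem.Set.ofList tangerine).Perm tangerine.dedup := by
    apply (List.perm_ext_iff_of_nodup (PySem.Set.nodup_ofList tangerine) tangerine.nodup_dedup).mpr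
    intro v
    rw [PySem.Set.mem_ofList, List.mem_dedup]
  have hperm2 := hperm.map (fun v => (tangerine.count v : Int))
  rw [hperm2.sum_eq]
  have := List.sum_map_count_dedup_eq_length tangerine
  have h2 : ∀ (l : List Int), (l.map fun v => (tangerine.count v : Int)).sum
      = ((l.map fun v => tangerine.count v).sum : Int) := by
    intro l
    induction l with
    | nil => simp
    | cons y ys ihy => simp [ihy]
  rw [h2, this]

-- ===== VERDICT (by name: the statement is the Claim_ definition above) =====
theorem solution_spec : Claim_equal_solution := by
  intro k tangerine _hdom hpre
  unfold Spec_solution solution solution_alt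
  set lst := PySem.List.sorted (PySem.Dict.counter tangerine).values (fun x => x) true with hlst
  have hperm : lst.Perm (PySem.Dict.counter tangerine).values :=
    PySem.List.sorted_perm _ _ _
  have hpos : ∀ x ∈ lst, 1 ≤ x := by
    intro x hx
    exact counter_values_pos tangerine x (hperm.mem_iff.mp hx)
  have hsum : lst.sum = (tangerine.length : Int) := by
    rw [hperm.sum_eq]; exact counter_values_sum tangerine
  have hloop : solutionLoop lst k (lst.length + 1) 0 0 0
      = 0 + (steps (lst.drop 0) (k - 0) : Int) := by
    have := solutionLoop_eq_steps lst k (lst.length + 1) 0 0 0 (by omega)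
    simpa using this
  simp only [List.drop_zero, sub_zero, zero_add] at hloop
  by_cases hk : k ≤ 0
  · rw [hloop, steps_of_nonpos lst k hk]
    simp [hk]
  · have hk' : 0 < k := by omega
    have hle : k ≤ lst.sum := by rw [hsum]; exact hpre
    rw [hloop, if_neg hk]
    exact (bisect_eq_steps lst k hpos hk' hle).symm
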